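-- pv_equiv track=rewrite | github.com/mikemott/Vermont-Signal | vermont_news_analyzer/modules/position_tracker.py | _get_paragraph_boundaries
-- ===== SOURCE A (Python) =====
-- from typing import List, Dict, Tuple, Optional
--
-- def _get_paragraph_boundaries(text: str) -> List[int]:
--     """
--     Get paragraph boundaries (double newline positions)
--
--     Args:
--         text: Full article text
--
--     Returns:
--         List of character positions where paragraphs start
--     """
--     boundaries = [0]  # First paragraph starts at 0
--     pos = 0
--
--     while True:
--         pos = text.find('\n\n', pos)
--         if pos == -1:
--             break
--         boundaries.append(pos + 2)  # After the double newline
--         pos += 2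
--
--     return boundaries
-- ===== SOURCE B (Python) =====
-- from typing import List
--
--
-- def _get_paragraph_boundaries(text: str) -> List[int]:
--     """Split once on '\n\n' and prefix-sum the part lengths instead of a repeated find loop."""
--     parts = text.split('\n\n')
--     boundaries = [0]
--     acc = 0
--     for part in parts[:-1]:
--         acc += len(part) + 2
--         boundaries.append(acc)
--     return boundaries
-- ===== Notes on version B (the rewrite author's own statement) =====
-- stated objective: simpler
-- what changed: Replaces the repeated text.find('\n\n', pos) while-loop with a single split('\n\n') followed by a prefix-sum of part lengths (+2 per separator).
import Mathlib
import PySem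

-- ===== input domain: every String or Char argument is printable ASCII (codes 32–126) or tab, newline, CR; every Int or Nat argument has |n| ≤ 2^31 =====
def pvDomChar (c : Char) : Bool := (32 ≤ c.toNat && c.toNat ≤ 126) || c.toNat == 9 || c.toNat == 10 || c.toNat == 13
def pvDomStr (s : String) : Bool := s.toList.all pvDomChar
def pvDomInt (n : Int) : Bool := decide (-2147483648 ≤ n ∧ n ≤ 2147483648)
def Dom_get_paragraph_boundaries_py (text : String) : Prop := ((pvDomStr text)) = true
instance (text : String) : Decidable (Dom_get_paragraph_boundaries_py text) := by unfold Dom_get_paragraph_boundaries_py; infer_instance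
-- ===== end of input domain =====

-- B replaces A's repeated find('\n\n', pos) loop by one split('\n\n') plus a prefix-sum of
-- part lengths — simpler, same O(n) cost.

-- ===== PORT A =====
-- A's 'while True: pos = text.find('\n\n', pos); …' loop; fuel only makes the recursion
-- total (each iteration advances pos by at least 2, so text.length + 1 steps always suffice).
def goA_get_paragraph_boundaries (s : String) (fuel : Nat) (pos : Int) : List Int :=
  match fuel with
  | 0 => []
  | f + 1 =>
    let p := PySem.Str.findFrom s "\n\n" pos none
    if p = -1 then []
    else (p + 2) :: goA_get_paragraph_boundaries s f (p + 2)

def get_paragraph_boundaries_py (text : String) : List Int :=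
  0 :: goA_get_paragraph_boundaries text (text.toList.length + 1) 0

-- ===== PORT B =====
-- Source B: parts = text.split('\n\n'); boundaries = [0]; acc = 0;
-- for part in parts[:-1]: acc += len(part) + 2; boundaries.append(acc)
def get_paragraph_boundaries_py_alt (text : String) : List Int :=
  let parts := PySem.Chars.splitOn text.toList ['\n', '\n']
  (parts.dropLast.foldl
    (fun (st : List Int × Int) part =>
      (st.1 ++ [st.2 + (part.length : Int) + 2], st.2 + (part.length : Int) + 2))
    ([0], 0)).1

-- ===== PRECONDITION & SPEC =====
def Spec_get_paragraph_boundaries_py (text : String) (out : List Int) : Prop := out = get_paragraph_boundaries_py_alt text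
instance (text : String) (out : List Int) : Decidable (Spec_get_paragraph_boundaries_py text out) := by unfold Spec_get_paragraph_boundaries_py; infer_instance

-- ===== CLAIM (what is proved, stated in full; the proofs are below) =====
def Claim_equal_get_paragraph_boundaries_py : Prop := ∀ (text : String), Dom_get_paragraph_boundaries_py text → Spec_get_paragraph_boundaries_py text (get_paragraph_boundaries_py text)

-- ===== LEMMAS AND PROOFS =====

-- the double-newline separator
def pvNN : List Char := ['\n', '\n']

-- reference: absolute boundary positions produced by a single left-to-right scan
def pvMarks : List Char → Int → List Int
  | [], _ => []
  | c :: rest, k =>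
    if pvNN.isPrefixOf (c :: rest) then (k + 2) :: pvMarks (rest.drop 1) (k + 2)
    else pvMarks rest (k + 1)
  termination_by l _ => l.length
  decreasing_by all_goals simp

-- structural version of Chars.splitOn for the fixed 2-char separator
def pvSplits : List Char → List Char → List (List Char)
  | [], cur => [cur.reverse]
  | c :: rest, cur =>
    if pvNN.isPrefixOf (c :: rest) then cur.reverse :: pvSplits (rest.drop 1) []
    else pvSplits rest (c :: cur)
  termination_by l _ => l.length
  decreasing_by all_goals simp

-- the partial sums of (len + 2) over all parts of the list
def pvBnds : List (List Char) → Int → List Int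
  | [], _ => []
  | p :: r, a => (a + (p.length : Int) + 2) :: pvBnds r (a + (p.length : Int) + 2)

lemma pvSplits_cons_pos (c : Char) (rest cur : List Char)
    (h : pvNN.isPrefixOf (c :: rest)) :
    pvSplits (c :: rest) cur = cur.reverse :: pvSplits (rest.drop 1) [] := by
  have h' : pvNN <+: c :: rest := List.isPrefixOf_iff_prefix.mp h
  rw [pvSplits.eq_def]
  simp [h', List.drop_one]

lemma pvSplits_cons_neg (c : Char) (rest cur : List Char)
    (h : ¬ pvNN.isPrefixOf (c :: rest)) :
    pvSplits (c :: rest) cur = pvSplits rest (c :: cur) := by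
  have h' : ¬ pvNN <+: c :: rest := fun hx => h (List.isPrefixOf_iff_prefix.mpr hx)
  rw [pvSplits.eq_def]
  simp [h']

lemma pvMarks_cons_pos (c : Char) (rest : List Char) (k : Int)
    (h : pvNN.isPrefixOf (c :: rest)) :
    pvMarks (c :: rest) k = (k + 2) :: pvMarks (rest.drop 1) (k + 2) := by
  have h' : pvNN <+: c :: rest := List.isPrefixOf_iff_prefix.mp h
  rw [pvMarks.eq_def]
  simp [h', List.drop_one]

lemma pvMarks_cons_neg (c : Char) (rest : List Char) (k : Int)
    (h : ¬ pvNN.isPrefixOf (c :: rest)) :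
    pvMarks (c :: rest) k = pvMarks rest (k + 1) := by
  have h' : ¬ pvNN <+: c :: rest := fun hx => h (List.isPrefixOf_iff_prefix.mpr hx)
  rw [pvMarks.eq_def]
  simp [h']

lemma pvSplits_ne_nil (l cur : List Char) : pvSplits l cur ≠ [] := by
  fun_induction pvSplits l cur with
  | case1 => simp
  | case2 c rest cur h ih => simp
  | case3 c rest cur h ih => simpa using ih

lemma pvGo_eq (fuel : Nat) (l cur : List Char) (acc : List (List Char))
    (h : l.length < fuel) :
    PySem.Chars.splitOn.go pvNN fuel l cur acc = acc.reverse ++ pvSplits l cur := by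
  induction fuel generalizing l cur acc with
  | zero => omega
  | succ f ih =>
    cases l with
    | nil => simp [PySem.Chars.splitOn.go, pvSplits]
    | cons c rest =>
      rw [show PySem.Chars.splitOn.go pvNN (f + 1) (c :: rest) cur acc =
          (if pvNN.isPrefixOf (c :: rest) then
            PySem.Chars.splitOn.go pvNN f ((c :: rest).drop 2) [] (cur.reverse :: acc)
          else PySem.Chars.splitOn.go pvNN f rest (c :: cur) acc) from rfl]
      by_cases hp : pvNN.isPrefixOf (c :: rest)
      · have h1 : ((c :: rest).drop 2).length < f := by
          simp only [List.length_cons] at h; simp; omega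
        rw [if_pos hp, ih ((c :: rest).drop 2) [] (cur.reverse :: acc) h1]
        rw [pvSplits_cons_pos c rest cur hp]
        simp [List.drop_succ_cons]
      · have h1 : rest.length < f := by simp only [List.length_cons] at h; omega
        rw [if_neg hp, ih rest (c :: cur) acc h1]
        rw [pvSplits_cons_neg c rest cur hp]

lemma pvSplitOn_eq (l : List Char) :
    PySem.Chars.splitOn l pvNN = pvSplits l [] := by
  unfold PySem.Chars.splitOn
  rw [pvGo_eq _ _ _ _ (by omega)]
  simp

-- find.go shift lemma
lemma pvFindGo_shift (l : List Char) (k : Nat) :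
    PySem.Chars.find.go pvNN l k =
      if PySem.Chars.find.go pvNN l 0 = -1 then -1
      else (k : Int) + PySem.Chars.find.go pvNN l 0 := by
  induction l generalizing k with
  | nil => simp [PySem.Chars.find.go, pvNN]
  | cons c t ih =>
    by_cases hp : pvNN.isPrefixOf (c :: t)
    · simp [PySem.Chars.find.go, hp]
    · have hge : (-1 : Int) ≤ PySem.Chars.find.go pvNN t 0 := by
        have := PySem.Chars.neg_one_le_find t pvNN
        unfold PySem.Chars.find at this
        exact this
      simp only [PySem.Chars.find.go, hp, Bool.false_eq_true, if_false]
      rw [ih (k + 1), ih 1]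
      split_ifs <;> push_cast <;> omega

lemma pvFind_cons (c : Char) (t : List Char) :
    PySem.Chars.find (c :: t) pvNN =
      if pvNN.isPrefixOf (c :: t) then 0
      else if PySem.Chars.find t pvNN = -1 then -1 else 1 + PySem.Chars.find t pvNN := by
  unfold PySem.Chars.find
  by_cases hp : pvNN.isPrefixOf (c :: t)
  · simp [PySem.Chars.find.go, hp]
  · simp only [PySem.Chars.find.go, hp]
    rw [pvFindGo_shift t 1]
    by_cases h0 : PySem.Chars.find.go pvNN t 0 = -1 <;> simp [h0]

-- pvMarks characterised through find
lemma pvMarks_find (l : List Char) (k : Int) :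
    pvMarks l k =
      if PySem.Chars.find l pvNN = -1 then []
      else (k + PySem.Chars.find l pvNN + 2) ::
        pvMarks (l.drop ((PySem.Chars.find l pvNN).toNat + 2))
          (k + PySem.Chars.find l pvNN + 2) := by
  fun_induction pvMarks l k with
  | case1 k => simp [PySem.Chars.find, PySem.Chars.find.go, pvNN]
  | case2 c rest k hp ih =>
    rw [pvFind_cons]
    simp [hp, List.drop_succ_cons]
  | case3 c rest k hp ih =>
    rw [pvFind_cons, ih]
    by_cases h0 : PySem.Chars.find rest pvNN = -1
    · simp [hp, h0]
    · have hge : 0 ≤ PySem.Chars.find rest pvNN := by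
        have := PySem.Chars.neg_one_le_find rest pvNN
        omega
      have h1 : (1 + PySem.Chars.find rest pvNN) ≠ -1 := by omega
      have h2 : (1 + PySem.Chars.find rest pvNN).toNat
          = (PySem.Chars.find rest pvNN).toNat + 1 := by omega
      simp only [hp, Bool.false_eq_true, if_false, h0, if_neg h1, h2]
      have e1 : k + (1 + PySem.Chars.find rest pvNN) + 2
          = k + 1 + PySem.Chars.find rest pvNN + 2 := by ring
      have e2 : List.drop ((PySem.Chars.find rest pvNN).toNat + 1 + 2) (c :: rest)
          = List.drop ((PySem.Chars.find rest pvNN).toNat + 2) rest := by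
        rw [show (PySem.Chars.find rest pvNN).toNat + 1 + 2
            = ((PySem.Chars.find rest pvNN).toNat + 2) + 1 from by omega,
          List.drop_succ_cons]
      rw [e1, e2]

lemma pvFind_bound (l : List Char) (h : PySem.Chars.find l pvNN ≠ -1) :
    (PySem.Chars.find l pvNN).toNat + 2 ≤ l.length := by
  have hge : 0 ≤ PySem.Chars.find l pvNN := by
    have := PySem.Chars.neg_one_le_find l pvNN; omega
  have hs := (PySem.Chars.find_spec (s := l) (sub := pvNN) hge).1
  have hlen := hs.length_le
  rw [List.length_drop, show pvNN.length = 2 from rfl] at hlen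
  omega

-- A's loop equals pvMarks on the remaining suffix
lemma pvGoA_eq (s : String) (fuel n : Nat)
    (hn : n ≤ s.toList.length) (hf : s.toList.length - n < fuel) :
    goA_get_paragraph_boundaries s fuel (n : Int)
      = pvMarks (s.toList.drop n) (n : Int) := by
  induction fuel generalizing n with
  | zero => omega
  | succ f ih =>
    rw [pvMarks_find]
    have hsep : ("\n\n" : String).toList = pvNN := by decide
    have hff := PySem.Chars.findFrom_natCast s.toList pvNN n hn
    by_cases h0 : PySem.Chars.find (s.toList.drop n) pvNN = -1
    · simp [goA_get_paragraph_boundaries, PySem.Str.findFrom_eq, hsep, hff, h0]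
    · have hge : 0 ≤ PySem.Chars.find (s.toList.drop n) pvNN := by
        have := PySem.Chars.neg_one_le_find (s.toList.drop n) pvNN; omega
      set p := PySem.Chars.find (s.toList.drop n) pvNN with hpdef
      have hb : p.toNat + 2 ≤ (s.toList.drop n).length := pvFind_bound _ h0
      have hdl : (s.toList.drop n).length = s.toList.length - n := by simp
      have hne : ((n : Int) + p) ≠ -1 := by omega
      have hcast : (n : Int) + p + 2 = ((n + p.toNat + 2 : Nat) : Int) := by omega
      have hih := ih (n + p.toNat + 2) (by omega) (by omega)
      simp only [goA_get_paragraph_boundaries, PySem.Str.findFrom_eq, hsep, hff, h0, if_false,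
        if_neg hne]
      rw [hcast, hih]
      rw [List.drop_drop]
      rw [Nat.add_assoc]

-- the foldl in B computes pvBnds
lemma pvFoldl_bnds (parts : List (List Char)) (bs : List Int) (a : Int) :
    (parts.foldl
      (fun (st : List Int × Int) part =>
        (st.1 ++ [st.2 + (part.length : Int) + 2], st.2 + (part.length : Int) + 2))
      (bs, a)).1 = bs ++ pvBnds parts a := by
  induction parts generalizing bs a with
  | nil => simp [pvBnds]
  | cons p r ih => simp [pvBnds, ih, List.append_assoc]

-- pvBnds over the split parts equals pvMarks
lemma pvBnds_splits (l cur : List Char) : ∀ (k : Int),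
    pvBnds ((pvSplits l cur).dropLast) (k - (cur.length : Int)) = pvMarks l k := by
  fun_induction pvSplits l cur with
  | case1 cur =>
    intro k
    rw [show pvMarks [] k = [] from by rw [pvMarks]]
    simp [pvBnds]
  | case2 c rest cur h ih =>
    intro k
    rw [pvMarks_cons_pos c rest k h]
    rw [List.dropLast_cons_of_ne_nil (pvSplits_ne_nil _ _)]
    rw [pvBnds]
    have h2 : k - (cur.length : Int) + (cur.reverse.length : Int) + 2 = k + 2 := by
      simp
    rw [h2]
    simpa using ih (k + 2)
  | case3 c rest cur h ih =>
    intro k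
    rw [pvMarks_cons_neg c rest k h]
    have := ih (k + 1)
    have h2 : k + 1 - ((c :: cur).length : Int) = k - (cur.length : Int) := by
      simp only [List.length_cons]
      push_cast
      ring
    rw [h2] at this
    exact this

-- ===== VERDICT (by name: the statement is the Claim_ definition above) =====
theorem get_paragraph_boundaries_py_spec : Claim_equal_get_paragraph_boundaries_py := by
  intro text _
  unfold Spec_get_paragraph_boundaries_py
  unfold get_paragraph_boundaries_py get_paragraph_boundaries_py_alt
  have hA := pvGoA_eq text (text.toList.length + 1) 0 (by omega) (by omega)
  simp only [Nat.cast_zero] at hA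
  rw [hA]
  have hnn : (['\n', '\n'] : List Char) = pvNN := by decide
  rw [hnn, pvSplitOn_eq, pvFoldl_bnds]
  have := pvBnds_splits text.toList [] 0
  simp at this
  simp [this]
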